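-- pv_equiv track=rewrite | github.com/zaddmc/Advent_of_Code | 2024/python/days/day22.py | result_series
-- ===== SOURCE A (Python) =====
-- def result_series(serie: list[int], target: list[int]):
--     previous = serie[:4]
--     banana = sum(previous)
--     for val in serie[4:]:
--         previous.pop(0)
--         banana += val
--         previous.append(val)
--
--         if previous == target:
--             return banana
--     return 0
-- ===== SOURCE B (Python) =====
-- def result_series(serie: list[int], target: list[int]):
--     # Build the full prefix-sum table once, then search for the first
--     # matching 4-window among windows ending at i >= 4 (the initial
--     # window serie[:4] is never checked, matching the task).
--     prefix = []
--     total = 0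
--     for v in serie:
--         total += v
--         prefix.append(total)
--     for i in range(4, len(serie)):
--         if serie[i-3:i+1] == target:
--             return prefix[i]
--     return 0
-- ===== Notes on version B (the rewrite author's own statement) =====
-- stated objective: alternative
-- what changed: Replaces A's mutating sliding-window list and running accumulator with a prebuilt prefix-sum table plus an index-based scan over slices serie[i-3:i+1].
import Mathlib
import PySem

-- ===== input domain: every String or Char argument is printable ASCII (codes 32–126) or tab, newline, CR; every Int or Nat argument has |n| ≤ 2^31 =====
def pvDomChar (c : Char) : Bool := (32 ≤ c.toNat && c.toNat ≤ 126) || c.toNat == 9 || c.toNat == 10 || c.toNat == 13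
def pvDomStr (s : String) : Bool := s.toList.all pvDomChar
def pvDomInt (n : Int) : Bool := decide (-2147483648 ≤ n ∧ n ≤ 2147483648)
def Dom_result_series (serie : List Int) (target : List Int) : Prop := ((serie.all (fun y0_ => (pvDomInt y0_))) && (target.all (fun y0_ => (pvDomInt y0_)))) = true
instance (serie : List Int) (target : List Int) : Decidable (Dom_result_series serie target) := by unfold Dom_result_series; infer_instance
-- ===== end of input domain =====

-- B replaces A's mutating sliding-window list + running accumulator with a prebuilt prefix-sum table and an index-based scan (alternative decomposition, same O(n) cost).


-- ===== PORT A =====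
-- loop of A: 'previous' window, remaining values, running sum; early return on match
def aLoop (target : List Int) : List Int → List Int → Int → Int
  | _, [], _ => 0
  | prev, val :: rest, banana =>
    let prev' := prev.tail ++ [val]      -- previous.pop(0); previous.append(val) (prev nonempty whenever the loop runs)
    let banana' := banana + val
    if prev' = target then banana' else aLoop target prev' rest banana'

def result_series (serie : List Int) (target : List Int) : Int :=
  aLoop target (PySem.List.slice serie none (some 4))
    (PySem.List.slice serie (some 4) none)
    (PySem.List.slice serie none (some 4)).sum

-- ===== PORT B =====
-- prefix-sum table built by B's first loop
def bPrefix (serie : List Int) : List Int :=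
  (serie.foldl (fun (st : List Int × Int) v => (st.1 ++ [st.2 + v], st.2 + v)) ([], 0)).1

-- B's second loop: scan indices, compare the slice serie[i-3:i+1] with target
def bLoop (serie target pref : List Int) : List Int → Int
  | [] => 0
  | i :: rest =>
    if PySem.List.slice serie (some (i - 3)) (some (i + 1)) = target then
      PySem.List.pyGetD pref i 0      -- prefix[i]; i is always in range here
    else bLoop serie target pref rest

def result_series_alt (serie : List Int) (target : List Int) : Int :=
  bLoop serie target (bPrefix serie) (PySem.List.pyRange 4 serie.length 1)

-- ===== PRECONDITION & SPEC =====
def Spec_result_series (serie : List Int) (target : List Int) (out : Int) : Prop := out = result_series_alt serie target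
instance (serie : List Int) (target : List Int) (out : Int) : Decidable (Spec_result_series serie target out) := by unfold Spec_result_series; infer_instance

-- ===== CLAIM (what is proved, stated in full; the proofs are below) =====
def Claim_equal_result_series : Prop := ∀ (serie : List Int) (target : List Int), Dom_result_series serie target → Spec_result_series serie target (result_series serie target)

-- ===== LEMMAS AND PROOFS =====

lemma bPrefix_aux (l acc : List Int) (t : Int) :
    (l.foldl (fun (st : List Int × Int) v => (st.1 ++ [st.2 + v], st.2 + v)) (acc, t)).1
      = acc ++ (List.range l.length).map (fun k => t + (l.take (k+1)).sum) := by
  induction l generalizing acc t with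
  | nil => simp
  | cons v rest ih =>
    simp only [List.foldl_cons, ih, List.length_cons, List.range_succ_eq_map,
      List.map_cons, List.map_map]
    simp [Function.comp, List.append_assoc, add_assoc]

lemma bPrefix_eq (serie : List Int) :
    bPrefix serie = (List.range serie.length).map (fun k => ((serie.take (k+1)).sum)) := by
  simpa using bPrefix_aux serie [] 0

lemma window_step (serie : List Int) (k : Nat) (h4 : 4 ≤ k) (hk : k < serie.length) :
    ((serie.drop (k-4)).take 4).tail ++ [serie[k]] = (serie.drop (k-3)).take 4 := by
  obtain ⟨j, rfl⟩ : ∃ j, k = j + 4 := ⟨k - 4, by omega⟩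
  have e3 : j + 4 - 3 = j + 1 := by omega
  have e4 : j + 4 - 4 = j := by omega
  have h1 : serie.drop j = serie[j] :: serie.drop (j+1) :=
    List.drop_eq_getElem_cons (by omega)
  have h2 : (serie.drop (j+1)).take 4 = (serie.drop (j+1)).take 3 ++ ((serie.drop (j+1))[3]?).toList :=
    List.take_add_one
  have h3 : (serie.drop (j+1))[3]? = some serie[j+4] := by
    rw [List.getElem?_drop, List.getElem?_eq_getElem (by omega)]
  rw [e3, e4, h1, h2, h3]
  rfl

lemma sum_take_succ (serie : List Int) (k : Nat) (hk : k < serie.length) :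
    (serie.take k).sum + serie[k] = (serie.take (k+1)).sum := by
  rw [List.take_add_one, List.getElem?_eq_getElem hk, Option.toList_some,
    List.sum_append, List.sum_cons, List.sum_nil]
  ring

lemma slice_window (serie : List Int) (k : Nat) (h4 : 4 ≤ k) :
    PySem.List.slice serie (some ((k:Int) - 3)) (some ((k:Int) + 1))
      = (serie.drop (k-3)).take 4 := by
  have ha : (k:Int) - 3 = ((k-3 : Nat) : Int) := by omega
  have hb : (k:Int) + 1 = ((k+1 : Nat) : Int) := by omega
  rw [ha, hb, PySem.List.slice_natCast]
  congr 1
  omega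

lemma main_loop (serie target : List Int) :
    ∀ (n k : Nat), n = serie.length - k → 4 ≤ k →
    aLoop target ((serie.drop (k-4)).take 4) (serie.drop k) ((serie.take k).sum)
      = bLoop serie target (bPrefix serie) (PySem.List.pyRange (k:Int) (serie.length:Int) 1) := by
  intro n
  induction n with
  | zero =>
    intro k hn h4
    have hlen : serie.length ≤ k := by omega
    have hd : serie.drop k = [] := by simp [List.drop_eq_nil_iff.mpr hlen]
    have hr : PySem.List.pyRange (k:Int) (serie.length:Int) 1 = [] := by
      simp [PySem.List.pyRange_of_pos (a := (k:Int)) (b := (serie.length:Int)) one_pos]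
      omega
    rw [hd, hr]
    rfl
  | succ m ih =>
    intro k hn h4
    have hk : k < serie.length := by omega
    have hd : serie.drop k = serie[k] :: serie.drop (k+1) :=
      List.drop_eq_getElem_cons hk
    have hr : PySem.List.pyRange (k:Int) (serie.length:Int) 1
        = (k:Int) :: PySem.List.pyRange ((k:Int)+1) (serie.length:Int) 1 := by
      exact PySem.List.pyRange_one_cons (by exact_mod_cast hk)
    rw [hd, hr]
    show (if ((serie.drop (k-4)).take 4).tail ++ [serie[k]] = target then (serie.take k).sum + serie[k]
        else aLoop target (((serie.drop (k-4)).take 4).tail ++ [serie[k]]) (serie.drop (k+1)) ((serie.take k).sum + serie[k]))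
      = _
    rw [window_step serie k h4 hk, sum_take_succ serie k hk]
    simp only [bLoop, slice_window serie k h4]
    by_cases hmatch : (serie.drop (k-3)).take 4 = target
    · simp only [if_pos hmatch]
      rw [bPrefix_eq, PySem.List.pyGetD_natCast]
      rw [List.getD_eq_getElem?_getD, List.getElem?_map,
        List.getElem?_range hk]
      rfl
    · simp only [if_neg hmatch]
      have : (k:Int) + 1 = ((k+1 : Nat) : Int) := by omega
      rw [this]
      have := ih (k+1) (by omega) (by omega)
      have e : k + 1 - 4 = k - 3 := by omega
      rw [e] at this
      exact this

-- ===== VERDICT (by name: the statement is the Claim_ definition above) =====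
theorem result_series_spec : Claim_equal_result_series := by
  intro serie target _
  unfold Spec_result_series result_series result_series_alt
  have h1 : PySem.List.slice serie none (some 4) = serie.take 4 := by
    simpa using PySem.List.slice_to serie (b := 4) (by norm_num)
  have h2 : PySem.List.slice serie (some 4) none = serie.drop 4 := by
    simpa using PySem.List.slice_from serie (a := 4) (by norm_num)
  rw [h1, h2]
  have := main_loop serie target (serie.length - 4) 4 rfl (le_refl 4)
  simpa using this
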